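-- pv_equiv track=rewrite | github.com/enricotomasi/GeeksforGeeks_problems | Easy/Counting number of sentences and words in text.py | sentenceWord
-- ===== SOURCE A (Python) =====
-- def sentenceWord(text):
--     # code here
--     sent = 1
--     words = 1
--
--     last = " "
--
--     for c in text:
--         if (c == "." or c == "!" or c == "?") and (last != "." and last != "!" and last != "?"):
--             sent += 1
--         elif c == " " and last != " ":
--             words += 1
--
--         last = c
--
--     if last == "." or last == "!" or last == "?":
--         sent -=1
--
--     if last == " ":
--         words -=1
--
--     return [sent, words]
-- ===== SOURCE B (Python) =====
-- def sentenceWord(text):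
--     # words: tokenize on a single-space separator and count non-empty tokens
--     def nonempty(chunks):
--         return sum(1 for w in chunks if w)
--     words = nonempty(text.split(' '))
--     # sentences: project the text onto a mask keeping only '.!?' (everything
--     # else becomes a space), so punctuation runs become the mask's tokens
--     mask = ''.join(c if c in '.!?' else ' ' for c in text)
--     sent = 1 + nonempty(mask.split(' ')) - (1 if text.endswith(('.', '!', '?')) else 0)
--     return [sent, words]
-- ===== Notes on version B (the rewrite author's own statement) =====
-- stated objective: alternative
-- what changed: Replaces A's single stateful character loop (mutable last/sent/words with transition tests and post-loop corrections) by tokenization: words counts the non-empty tokens of the text split on a single space, and sentences counts the tokens of a punctuation-only mask of the text split the same way, with one trailing-punctuation adjustment.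
import Mathlib
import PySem

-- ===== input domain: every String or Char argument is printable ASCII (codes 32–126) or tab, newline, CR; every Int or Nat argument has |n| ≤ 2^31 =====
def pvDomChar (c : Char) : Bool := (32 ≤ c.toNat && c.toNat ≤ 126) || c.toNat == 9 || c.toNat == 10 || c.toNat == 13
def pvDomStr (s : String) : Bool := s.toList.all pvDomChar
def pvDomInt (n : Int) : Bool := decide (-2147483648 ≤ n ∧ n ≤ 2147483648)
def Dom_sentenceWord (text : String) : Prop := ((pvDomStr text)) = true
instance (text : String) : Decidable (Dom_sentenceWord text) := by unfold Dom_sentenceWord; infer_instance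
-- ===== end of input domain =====

-- B replaces A's stateful character loop by tokenization: count non-empty tokens of split(' ')
-- for words, and tokens of a punctuation-only mask for sentences; objective: alternative.

-- ===== PORT A =====
def sentenceWord (text : String) : List Int :=
  let st := text.toList.foldl (fun (st : Int × Int × Char) c =>
    let sent := st.1
    let words := st.2.1
    let last := st.2.2
    if (c == '.' || c == '!' || c == '?') && (last != '.' && last != '!' && last != '?') then
      (sent + 1, words, c)
    else if c == ' ' && last != ' ' then
      (sent, words + 1, c)
    else
      (sent, words, c)) (1, 1, ' ')
  let sent := if st.2.2 == '.' || st.2.2 == '!' || st.2.2 == '?' then st.1 - 1 else st.1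
  let words := if st.2.2 == ' ' then st.2.1 - 1 else st.2.1
  [sent, words]

-- ===== PORT B =====
def pvIsPunct (c : Char) : Bool := c == '.' || c == '!' || c == '?'

-- hand port of Python's s.split(' ') (single-space separator), exact on that case
def pvSplitSp : List Char → List (List Char)
  | [] => [[]]
  | c :: t =>
    let r := pvSplitSp t
    if c == ' ' then [] :: r else (c :: r.headD []) :: r.tail

-- sum(1 for w in chunks if w)
def pvNonempty (chunks : List (List Char)) : Int :=
  (chunks.countP (fun w => !w.isEmpty) : Nat)

def sentenceWord_alt (text : String) : List Int :=
  let words := pvNonempty (pvSplitSp text.toList)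
  let mask := text.toList.map (fun c => if pvIsPunct c then c else ' ')
  let sent := 1 + pvNonempty (pvSplitSp mask)
    - (if (match text.toList.getLast? with | some c => pvIsPunct c | none => false) then 1 else 0)
  [sent, words]

-- ===== PRECONDITION & SPEC =====
def Spec_sentenceWord (text : String) (out : List Int) : Prop := out = sentenceWord_alt text
instance (text : String) (out : List Int) : Decidable (Spec_sentenceWord text out) := by unfold Spec_sentenceWord; infer_instance

-- ===== CLAIM =====
def Claim_equal_sentenceWord : Prop := ∀ (text : String), Dom_sentenceWord text → Spec_sentenceWord text (sentenceWord text)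

-- ===== LEMMAS AND PROOFS =====

-- A's sentence increments (punct-run starts), recursively
def pvSC (p : Char) : List Char → Int
  | [] => 0
  | c :: t => (if pvIsPunct c && !pvIsPunct p then 1 else 0) + pvSC c t

-- A's word increments (transitions into a space), recursively
def pvWC (p : Char) : List Char → Int
  | [] => 0
  | c :: t => (if c == ' ' && p != ' ' then 1 else 0) + pvWC c t

-- non-space run starts (transitions out of a space), recursively
def pvRS (p : Char) : List Char → Int
  | [] => 0
  | c :: t => (if c != ' ' && p == ' ' then 1 else 0) + pvRS c t

lemma pvCond (c p : Char) :
    ((c == '.' || c == '!' || c == '?') && (p != '.' && p != '!' && p != '?'))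
      = (pvIsPunct c && !pvIsPunct p) := by
  simp [pvIsPunct, bne, Bool.not_or, Bool.and_assoc]

lemma pvPunct_ne_space (c : Char) (h : pvIsPunct c = true) : (c == ' ') = false := by
  simp [pvIsPunct] at h
  rcases h with (h|h)|h <;> subst h <;> decide

lemma pvFoldA (l : List Char) : ∀ (s w : Int) (p : Char),
    l.foldl (fun (st : Int × Int × Char) c =>
      let sent := st.1
      let words := st.2.1
      let last := st.2.2
      if (c == '.' || c == '!' || c == '?') && (last != '.' && last != '!' && last != '?') then
        (sent + 1, words, c)
      else if c == ' ' && last != ' ' then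
        (sent, words + 1, c)
      else
        (sent, words, c)) (s, w, p)
    = (s + pvSC p l, w + pvWC p l, l.getLastD p) := by
  induction l with
  | nil => intro s w p; simp [pvSC, pvWC]
  | cons c t ih =>
    intro s w p
    simp only [List.foldl_cons, List.getLastD_cons]
    simp only [pvCond] at ih ⊢
    by_cases hp : (pvIsPunct c && !pvIsPunct p) = true
    · have hc : pvIsPunct c = true := by simpa using (Bool.and_elim_left hp)
      have hcs : (c == ' ') = false := pvPunct_ne_space c hc
      rw [if_pos hp, ih]
      simp [pvSC, pvWC, hp, hcs, Prod.ext_iff]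
      omega
    · have hp' : (pvIsPunct c && !pvIsPunct p) = false := by simpa using hp
      rw [if_neg hp]
      by_cases hs : (c == ' ' && p != ' ') = true
      · rw [if_pos hs, ih]
        simp [pvSC, pvWC, hp', hs, Prod.ext_iff]
        omega
      · have hs' : (c == ' ' && p != ' ') = false := by simpa using hs
        rw [if_neg hs, ih]
        simp [pvSC, pvWC, hp', hs']

lemma pvSplitSp_ne_nil (l : List Char) : pvSplitSp l ≠ [] := by
  cases l with
  | nil => simp [pvSplitSp]
  | cons c t => simp only [pvSplitSp]; split <;> simp

-- splitting on ' ' and counting non-empty chunks counts exactly the non-space run starts;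
-- the second conjunct (previous char not a space) is the induction strengthening
lemma pvSplit_count (l : List Char) :
    pvNonempty (pvSplitSp l) = pvRS ' ' l ∧
    ∀ c : Char, (c == ' ') = false →
      pvNonempty (pvSplitSp l).tail = pvRS c l := by
  induction l with
  | nil => exact ⟨by simp [pvSplitSp, pvNonempty, pvRS], fun c _ => by simp [pvSplitSp, pvNonempty, pvRS]⟩
  | cons c t ih =>
    obtain ⟨ih1, ih2⟩ := ih
    obtain ⟨hd, r, h⟩ : ∃ hd r, pvSplitSp t = hd :: r := by
      cases hsp : pvSplitSp t with
      | nil => exact absurd hsp (pvSplitSp_ne_nil t)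
      | cons a b => exact ⟨a, b, rfl⟩
    rw [h] at ih1
    by_cases hc : (c == ' ') = true
    · have hc' : c = ' ' := by simpa using hc
      constructor
      · simp only [pvSplitSp, h, if_pos hc]
        simp [pvNonempty, pvRS, List.countP_cons, hc'] at ih1 ⊢
        omega
      · intro c' hc'2
        simp only [pvSplitSp, h, if_pos hc, List.tail_cons]
        simp [pvNonempty, pvRS, hc', hc'2] at ih1 ⊢
        omega
    · have hcb : (c == ' ') = false := by simpa using hc
      have ht := ih2 c hcb
      rw [h, List.tail_cons] at ht
      have hcne : ¬ c = ' ' := by simpa using hc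
      constructor
      · simp only [pvSplitSp, h, if_neg hc]
        simp [pvNonempty, pvRS, hcne] at ht ⊢
        omega
      · intro c' hc'2
        simp only [pvSplitSp, h, if_neg hc, List.tail_cons]
        simp [pvNonempty, pvRS, hc'2] at ht ⊢
        omega

-- on the punctuation mask, non-space run starts are exactly A's punct-run starts
lemma pvMask_runs (l : List Char) : ∀ p : Char,
    pvRS (if pvIsPunct p then p else ' ') (l.map (fun c => if pvIsPunct c then c else ' '))
      = pvSC p l := by
  induction l with
  | nil => intro p; simp [pvRS, pvSC]
  | cons c t ih =>
    intro p
    simp only [List.map_cons, pvRS, pvSC, ih c]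
    congr 1
    by_cases hc : pvIsPunct c = true <;> by_cases hp : pvIsPunct p = true
    · have := pvPunct_ne_space c hc
      have := pvPunct_ne_space p hp
      simp_all [bne]
    · simp_all [pvPunct_ne_space c hc, bne]
    · simp_all [pvPunct_ne_space p hp, bne]
    · simp_all [bne]

-- A's word count with its end correction equals the run-start count
lemma pvWords_eq (l : List Char) : ∀ p : Char,
    pvWC p l + (if p == ' ' then 1 else 0)
      = pvRS p l + (if l.getLastD p == ' ' then 1 else 0) := by
  induction l with
  | nil => intro p; simp [pvWC, pvRS]
  | cons c t ih =>
    intro p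
    simp only [pvWC, pvRS, List.getLastD_cons]
    have h := ih c
    by_cases hc : c = ' ' <;> by_cases hp : p = ' ' <;>
      simp [hc, hp] at h ⊢ <;> omega

lemma pvLast_eq (l : List Char) :
    (match l.getLast? with | some c => pvIsPunct c | none => false)
      = pvIsPunct (l.getLastD ' ') := by
  cases h : l.getLast? with
  | none =>
    have : l = [] := List.getLast?_eq_none_iff.mp h
    subst this; simp [pvIsPunct]
  | some c => simp [List.getLastD_eq_getLast?, h]

-- ===== VERDICT =====
theorem sentenceWord_spec : Claim_equal_sentenceWord := by
  intro text _
  unfold Spec_sentenceWord sentenceWord sentenceWord_alt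
  simp only [pvFoldA, pvSplit_count text.toList |>.1, pvLast_eq]
  have hmask : pvNonempty (pvSplitSp (text.toList.map (fun c => if pvIsPunct c then c else ' ')))
      = pvSC ' ' text.toList := by
    rw [(pvSplit_count (text.toList.map (fun c => if pvIsPunct c then c else ' '))).1]
    have := pvMask_runs text.toList ' '
    simpa [pvIsPunct] using this
  have hw := pvWords_eq text.toList ' '
  simp only [hmask]
  have hpv : ∀ x : Char, (x == '.' || x == '!' || x == '?') = pvIsPunct x := fun x => rfl
  simp only [hpv]
  generalize hL : text.toList.getLastD ' ' = L at hw ⊢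
  by_cases hpend : pvIsPunct L = true
  · have hsp : (L == ' ') = false := pvPunct_ne_space L hpend
    simp only [hpend, hsp] at hw ⊢
    simp at hw ⊢
    omega
  · have hpend' : pvIsPunct L = false := by simpa using hpend
    by_cases hsp : (L == ' ') = true
    · simp only [hpend', hsp] at hw ⊢
      simp at hw ⊢
      omega
    · have hsp' : (L == ' ') = false := by simpa using hsp
      simp only [hpend', hsp'] at hw ⊢
      simp at hw ⊢
      omega
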